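-- pv_equiv track=rewrite | github.com/KCaziz/Pentral | backend/app/services/pentral.py | clean_command
-- ===== SOURCE A (Python) =====
-- def clean_query(response):
--     """
--     Supprime les backticks et caractères spéciaux inutiles.
--     """
--     response = response.translate(str.maketrans('', '', '\\|"`*')).strip()
--     if response.startswith("```yaml"):
--         response = response[7:]
--     if response.startswith("```"):
--         response = response[3:]
--     if response.endswith("```"):
--         response = response[:-3]
--     return response.strip()
--
-- def clean_command(response):
--     """
--     Nettoie une commande YAML ou bloc LLM en corrigeant indentation, blocs `|`, et lignes invalides.
--     """
--     response = clean_query(response)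
--     lines = response.splitlines()
--     cleaned_lines = []
--
--     current_key = None
--     multiline_value = ""
--
--     for line in lines:
--         line = line.strip()
--
--         # Ignorer lignes vides
--         if not line:
--             continue
--
--         if line.endswith(": |"):
--             current_key = line[:-2].strip()  # ex: install_command
--             multiline_value = ""
--             continue
--         if line.endswith(": -"):
--             current_key = line[:-2].strip()
--             multiline_value = ""
--             continue
--
--         # Cas des lignes suivantes du bloc
--         if current_key:
--             # On ajoute la valeur à la ligne précédente
--             multiline_value += line.strip() + " "
--             continue
--
--         # Ligne normale avec :
--         if ":" in line:
--             cleaned_lines.append(line)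
--
--     # Ajouter la ligne reconstituée si on a traité un bloc `|`
--     if current_key and multiline_value:
--         multiline_line = f"{current_key}: {multiline_value.strip()}"
--         cleaned_lines.append(multiline_line)
--
--     return "\n".join(cleaned_lines)
-- ===== SOURCE B (Python) =====
-- def clean_query(response):
--     response = response.translate(str.maketrans('', '', '\\|"`*')).strip()
--     if response.startswith("```yaml"):
--         response = response[7:]
--     if response.startswith("```"):
--         response = response[3:]
--     if response.endswith("```"):
--         response = response[:-3]
--     return response.strip()
--
-- def _is_marker(line):
--     return line.endswith(": |") or line.endswith(": -")
--
-- def clean_command(response):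
--     # Split the cleaned, stripped line list at the block marker, then rebuild:
--     # keep the ':'-lines before it and fold everything after it into one value.
--     lines = [l.strip() for l in clean_query(response).splitlines() if l.strip()]
--     before = []
--     rest = lines
--     while rest and not _is_marker(rest[0]):
--         before.append(rest[0])
--         rest = rest[1:]
--     if not rest:
--         return "\n".join(l for l in lines if ":" in l)
--     kept = [l for l in before if ":" in l]
--     value = " ".join(rest[1:])
--     if value:
--         kept.append(rest[0][:-2].strip() + ": " + value)
--     return "\n".join(kept)
-- ===== Notes on version B (the rewrite author's own statement) =====
-- stated objective: simpler
-- what changed: A runs a stateful single pass holding (current_key, multiline_value) registers; B splits the cleaned line list at the first block-marker line and rebuilds from the two halves with plain filters and a join. Pre_ excludes responses whose cleaned text contains two or more block-marker lines: there A keeps only the last marker's block while B folds everything after the first marker into it, and neither choice is specified.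
-- outside the precondition, e.g. on clean_command('a: -\nx\nb: -\ny'): A returns 'b:: y', B returns 'a:: x b: - y'
import Mathlib
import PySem

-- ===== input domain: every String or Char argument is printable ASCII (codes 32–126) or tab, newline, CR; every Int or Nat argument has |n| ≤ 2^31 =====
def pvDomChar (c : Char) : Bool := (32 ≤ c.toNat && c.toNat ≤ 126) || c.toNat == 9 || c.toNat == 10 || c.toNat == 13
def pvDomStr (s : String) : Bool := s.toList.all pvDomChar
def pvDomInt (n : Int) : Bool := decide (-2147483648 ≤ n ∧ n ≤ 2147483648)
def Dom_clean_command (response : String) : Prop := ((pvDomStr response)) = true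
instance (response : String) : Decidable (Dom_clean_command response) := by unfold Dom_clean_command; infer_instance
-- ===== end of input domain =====

-- B rebuilds the output by splitting the cleaned line list at the first block
-- marker instead of A's stateful single pass; objective: simpler, not faster.

-- ===== PORT A =====
-- clean_query, the helper both Pythons contain verbatim (translate deleting the
-- chars \ | " ` * is ported by hand as a filter — exact: it deletes those code points).
def cqChars (s : List Char) : List Char :=
  let r := PySem.Chars.strip (s.filter (fun c => !([ '\\', '|', '"', '`', '*' ].contains c)))
  let r := if PySem.Chars.startswith r ("```yaml".toList) then PySem.Chars.slice r (some 7) none else r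
  let r := if PySem.Chars.startswith r ("```".toList) then PySem.Chars.slice r (some 3) none else r
  let r := if PySem.Chars.endswith r ("```".toList) then PySem.Chars.slice r none (some (-3)) else r
  PySem.Chars.strip r

-- one iteration of A's for-loop over (cleaned_lines, current_key, multiline_value)
def stepA (st : List (List Char) × Option (List Char) × List Char) (line : List Char) :
    List (List Char) × Option (List Char) × List Char :=
  match st with
  | (cleaned, key, mv) =>
    let l := PySem.Chars.strip line
    if l.isEmpty then (cleaned, key, mv)
    else if PySem.Chars.endswith l (": |".toList) then
      (cleaned, some (PySem.Chars.strip (PySem.Chars.slice l none (some (-2)))), [])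
    else if PySem.Chars.endswith l (": -".toList) then
      (cleaned, some (PySem.Chars.strip (PySem.Chars.slice l none (some (-2)))), [])
    else if (match key with | some k => !k.isEmpty | none => false) then
      (cleaned, key, mv ++ PySem.Chars.strip l ++ [' '])
    else if PySem.Chars.isIn [':'] l then (cleaned ++ [l], key, mv)
    else (cleaned, key, mv)

def clean_command (response : String) : String :=
  let lines := PySem.Chars.splitlines (cqChars response.toList)
  match lines.foldl stepA ([], none, []) with
  | (cleaned, key, mv) =>
    let cleaned :=
      match key with
      | some k =>
        if !k.isEmpty && !mv.isEmpty then cleaned ++ [k ++ (": ".toList) ++ PySem.Chars.strip mv]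
        else cleaned
      | none => cleaned
    String.mk (PySem.Chars.join ['\n'] cleaned)

-- ===== PORT B =====
def markerB (l : List Char) : Bool :=
  PySem.Chars.endswith l (": |".toList) || PySem.Chars.endswith l (": -".toList)

def clean_command_alt (response : String) : String :=
  let lines := ((PySem.Chars.splitlines (cqChars response.toList)).map PySem.Chars.strip).filter
      (fun l => !l.isEmpty)
  -- Source B's while-loop splits lines at its first marker: before / rest (= takeWhile/dropWhile)
  let before := lines.takeWhile (fun l => !markerB l)
  match lines.dropWhile (fun l => !markerB l) with
  | [] => String.mk (PySem.Chars.join ['\n'] (lines.filter (fun l => PySem.Chars.isIn [':'] l)))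
  | m :: rest =>
    let kept := before.filter (fun l => PySem.Chars.isIn [':'] l)
    let value := PySem.Chars.join [' '] rest
    let kept :=
      if !value.isEmpty then
        kept ++ [PySem.Chars.strip (PySem.Chars.slice m none (some (-2))) ++ (": ".toList) ++ value]
      else kept
    String.mk (PySem.Chars.join ['\n'] kept)

-- ===== PRECONDITION & SPEC =====
-- Pre_ excludes responses whose cleaned text contains two or more block-marker lines:
-- there A keeps only the LAST marker's block while B folds everything after the FIRST
-- marker into it, and neither choice is specified (A still returns a value there).
def Pre_clean_command (response : String) : Prop :=
  (((PySem.Chars.splitlines (cqChars response.toList)).map PySem.Chars.strip).filter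
      (fun l => !l.isEmpty)).countP markerB ≤ 1
instance (response : String) : Decidable (Pre_clean_command response) := by
  unfold Pre_clean_command; infer_instance

def pvWitness_clean_command : String := "tool: nmap\ninstall_command: -\napt update\napt install nmap"

def Spec_clean_command (response : String) (out : String) : Prop := out = clean_command_alt response
instance (response : String) (out : String) : Decidable (Spec_clean_command response out) := by
  unfold Spec_clean_command; infer_instance

-- ===== CLAIM (what is proved, stated in full; the proofs are below) =====
def Claim_equal_clean_command : Prop :=
  ∀ (response : String), Dom_clean_command response → Pre_clean_command response →
    Spec_clean_command response (clean_command response)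

-- ===== LEMMAS AND PROOFS =====

-- B's computation on the line list, factored out so the match reduces in proofs
def altCore (lines : List (List Char)) : List (List Char) :=
  match lines.dropWhile (fun l => !markerB l) with
  | [] => lines.filter (fun l => PySem.Chars.isIn [':'] l)
  | m :: rest =>
    let kept := (lines.takeWhile (fun l => !markerB l)).filter (fun l => PySem.Chars.isIn [':'] l)
    if !(PySem.Chars.join [' '] rest).isEmpty then
      kept ++ [PySem.Chars.strip (PySem.Chars.slice m none (some (-2))) ++ (": ".toList)
        ++ PySem.Chars.join [' '] rest]
    else kept

lemma alt_eq_core (response : String) :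
    clean_command_alt response
      = String.mk (PySem.Chars.join ['\n']
          (altCore (((PySem.Chars.splitlines (cqChars response.toList)).map PySem.Chars.strip).filter
            (fun l => !l.isEmpty)))) := by
  simp only [clean_command_alt, altCore]
  cases h : (((PySem.Chars.splitlines (cqChars response.toList)).map PySem.Chars.strip).filter
      (fun l => !l.isEmpty)).dropWhile (fun l => !markerB l) with
  | nil => rfl
  | cons m rest =>
    by_cases hv : (PySem.Chars.join [' '] rest).isEmpty <;> simp [hv]

lemma altCore_nil (lines : List (List Char))
    (h : lines.dropWhile (fun l => !markerB l) = []) :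
    altCore lines = lines.filter (fun l => PySem.Chars.isIn [':'] l) := by
  unfold altCore; rw [h]

lemma altCore_cons (lines : List (List Char)) (m : List Char) (rest : List (List Char))
    (h : lines.dropWhile (fun l => !markerB l) = m :: rest) :
    altCore lines
      = if !(PySem.Chars.join [' '] rest).isEmpty then
          (lines.takeWhile (fun l => !markerB l)).filter (fun l => PySem.Chars.isIn [':'] l)
            ++ [PySem.Chars.strip (PySem.Chars.slice m none (some (-2))) ++ (": ".toList)
              ++ PySem.Chars.join [' '] rest]
        else (lines.takeWhile (fun l => !markerB l)).filter (fun l => PySem.Chars.isIn [':'] l) := by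
  unfold altCore; rw [h]

-- proof-side vocabulary
def keyOf (l : List Char) : List Char :=
  PySem.Chars.strip (PySem.Chars.slice l none (some (-2)))

def truthy : Option (List Char) → Bool
  | some k => !k.isEmpty
  | none => false

-- A's loop step on an already stripped, nonempty line
def stepA' (st : List (List Char) × Option (List Char) × List Char) (l : List Char) :
    List (List Char) × Option (List Char) × List Char :=
  match st with
  | (cleaned, key, mv) =>
    if PySem.Chars.endswith l (": |".toList) then (cleaned, some (keyOf l), [])
    else if PySem.Chars.endswith l (": -".toList) then (cleaned, some (keyOf l), [])
    else if truthy key then (cleaned, key, mv ++ l ++ [' '])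
    else if PySem.Chars.isIn [':'] l then (cleaned ++ [l], key, mv)
    else (cleaned, key, mv)

def finAux : Option (List Char) → List Char → List (List Char)
  | some k, mv =>
    if !k.isEmpty && !mv.isEmpty then [k ++ (": ".toList) ++ PySem.Chars.strip mv] else []
  | none, _ => []

def fin (st : List (List Char) × Option (List Char) × List Char) : List (List Char) :=
  match st with
  | (cleaned, key, mv) => cleaned ++ finAux key mv

-- A's loop, defunctionalized: what the rest of the run appends to cleaned_lines
def runA : Option (List Char) → List Char → List (List Char) → List (List Char)
  | key, mv, [] => finAux key mv
  | key, mv, l :: ls =>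
    if markerB l then runA (some (keyOf l)) [] ls
    else if truthy key then runA key (mv ++ l ++ [' ']) ls
    else (if PySem.Chars.isIn [':'] l then [l] else []) ++ runA key mv ls

def flatSp (ls : List (List Char)) : List Char := (ls.map (· ++ [' '])).flatten

-- ---- generic dropWhile/strip facts ----

lemma suffix_reverse {α : Type} {l₁ l₂ : List α} (h : l₁ <:+ l₂) :
    l₁.reverse <+: l₂.reverse := by
  obtain ⟨w, rfl⟩ := h; exact ⟨w.reverse, by simp⟩

lemma take_len_succ {α : Type} (x : List α) (a : α) (rest : List α) :
    (x ++ a :: rest).take (x.length + 1) = x ++ [a] := by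
  induction x with
  | nil => simp
  | cons y x ih => simpa [List.take_succ_cons, Nat.succ_eq_add_one] using ih

lemma dw_idem {α : Type} (p : α → Bool) (l : List α) :
    (l.dropWhile p).dropWhile p = l.dropWhile p := by
  induction l with
  | nil => rfl
  | cons a t ih => by_cases h : p a <;> simp [List.dropWhile_cons, h, ih]

lemma dw_head_false {α : Type} {p : α → Bool} {l t : List α} {a : α}
    (h : l.dropWhile p = a :: t) : p a = false := by
  induction l with
  | nil => simp at h
  | cons b u ih =>
    by_cases hb : p b
    · exact ih (by simpa [List.dropWhile_cons, hb] using h)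
    · rw [List.dropWhile_cons_of_neg hb] at h
      cases h; simpa using hb

lemma strip_strip (s : List Char) :
    PySem.Chars.strip (PySem.Chars.strip s) = PySem.Chars.strip s := by
  unfold PySem.Chars.strip PySem.Chars.rstrip PySem.Chars.lstrip
  cases h : ((s.dropWhile PySem.Chars.isspace).reverse.dropWhile PySem.Chars.isspace).reverse with
  | nil => simp
  | cons a u =>
    have hrev : (s.dropWhile PySem.Chars.isspace).reverse.dropWhile PySem.Chars.isspace
        = u.reverse ++ [a] := by
      have := congrArg List.reverse h; simpa using this
    have hsuff : u.reverse ++ [a] <:+ (s.dropWhile PySem.Chars.isspace).reverse := by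
      rw [← hrev]; exact List.dropWhile_suffix _
    have hpre : a :: u <+: s.dropWhile PySem.Chars.isspace := by
      have := suffix_reverse hsuff
      simpa using this
    obtain ⟨w, hw⟩ := hpre
    have ha : PySem.Chars.isspace a = false := dw_head_false hw.symm
    have h5 : (a :: u).dropWhile PySem.Chars.isspace = a :: u :=
      List.dropWhile_cons_of_neg (by simp [ha])
    have h6 : (a :: u).reverse
        = (s.dropWhile PySem.Chars.isspace).reverse.dropWhile PySem.Chars.isspace := by
      simpa using hrev.symm
    rw [h5, h6, dw_idem]
    exact h

lemma lstrip_eq_self_of_strip {l : List Char} (h : PySem.Chars.strip l = l) :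
    l.dropWhile PySem.Chars.isspace = l := by
  have hsuff : l.dropWhile PySem.Chars.isspace <:+ l := List.dropWhile_suffix _
  have hpre : PySem.Chars.strip l <+: l.dropWhile PySem.Chars.isspace := by
    unfold PySem.Chars.strip PySem.Chars.rstrip PySem.Chars.lstrip
    have h0 := List.dropWhile_suffix (l := (l.dropWhile PySem.Chars.isspace).reverse)
      (p := PySem.Chars.isspace)
    have := suffix_reverse h0
    simpa using this
  rw [h] at hpre
  exact hsuff.eq_of_length (le_antisymm hsuff.length_le hpre.length_le)

lemma rstrip_eq_self_of_strip {l : List Char} (h : PySem.Chars.strip l = l) :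
    (l.reverse.dropWhile PySem.Chars.isspace).reverse = l := by
  have h1 := lstrip_eq_self_of_strip h
  have := h
  unfold PySem.Chars.strip PySem.Chars.rstrip PySem.Chars.lstrip at this
  rwa [h1] at this

lemma head_not_space {a : Char} {t : List Char} (h : PySem.Chars.strip (a :: t) = a :: t) :
    PySem.Chars.isspace a = false := by
  have h1 := lstrip_eq_self_of_strip h
  by_cases hs : PySem.Chars.isspace a
  · exfalso
    rw [List.dropWhile_cons_of_pos hs] at h1
    have := List.length_dropWhile_le (p := PySem.Chars.isspace) (l := t)
    rw [h1] at this; simp at this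
  · simpa using hs

lemma lstrip_append_of_head {a : Char} {t rest : List Char}
    (ha : PySem.Chars.isspace a = false) :
    (a :: t ++ rest).dropWhile PySem.Chars.isspace = a :: t ++ rest := by
  simp [List.dropWhile_cons, ha]

lemma rstrip_append {y z : List Char}
    (hz : z.reverse.dropWhile PySem.Chars.isspace ≠ []) :
    ((y ++ z).reverse.dropWhile PySem.Chars.isspace).reverse
      = y ++ (z.reverse.dropWhile PySem.Chars.isspace).reverse := by
  rw [List.reverse_append, List.dropWhile_append]
  simp only [List.isEmpty_iff]
  rw [if_neg hz]
  simp

lemma strip_ne_nil_of_mem {c : Char} {s : List Char} (hc : c ∈ s)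
    (hws : PySem.Chars.isspace c = false) : PySem.Chars.strip s ≠ [] := by
  unfold PySem.Chars.strip PySem.Chars.rstrip PySem.Chars.lstrip
  intro h
  have h' : (s.dropWhile PySem.Chars.isspace).reverse.dropWhile PySem.Chars.isspace = [] := by
    simpa using congrArg List.reverse h
  rw [List.dropWhile_eq_nil_iff] at h'
  have hcd : c ∈ s.dropWhile PySem.Chars.isspace := by
    rcases (List.mem_append.mp (by rw [List.takeWhile_append_dropWhile]; exact hc :
        c ∈ s.takeWhile PySem.Chars.isspace ++ s.dropWhile PySem.Chars.isspace)) with h1 | h1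
    · exact absurd (List.mem_takeWhile_imp h1) (by simp [hws])
    · exact h1
  exact absurd (h' c (by simpa using hcd)) (by simp [hws])

-- ---- the value string: strip of A's accumulated block equals B's " ".join ----

lemma flat_cons (l : List Char) (ls : List (List Char)) :
    flatSp (l :: ls) = l ++ [' '] ++ flatSp ls := by
  simp [flatSp]

lemma strip_flat (ls : List (List Char))
    (h : ∀ l ∈ ls, PySem.Chars.strip l = l ∧ l ≠ []) :
    PySem.Chars.strip (flatSp ls) = PySem.Chars.join [' '] ls := by
  induction ls with
  | nil => simp [flatSp, PySem.Chars.join_nil, PySem.Chars.strip, PySem.Chars.lstrip, PySem.Chars.rstrip]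
  | cons l ls ih =>
    obtain ⟨hl, hlne⟩ := h l (by simp)
    obtain ⟨a, t, rfl⟩ : ∃ a t, l = a :: t := by
      cases l with | nil => exact absurd rfl hlne | cons a t => exact ⟨a, t, rfl⟩
    have ha : PySem.Chars.isspace a = false := head_not_space hl
    rw [flat_cons]
    unfold PySem.Chars.strip PySem.Chars.lstrip PySem.Chars.rstrip
    rw [show (a :: t ++ [' '] ++ flatSp ls) = a :: t ++ ([' '] ++ flatSp ls) by simp,
      lstrip_append_of_head ha]
    cases ls with
    | nil =>
      simp only [flatSp, List.map_nil, List.flatten_nil, List.append_nil]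
      have hsp : ((a :: t ++ [' ']).reverse.dropWhile PySem.Chars.isspace)
          = (a :: t).reverse.dropWhile PySem.Chars.isspace := by
        simp [List.dropWhile_cons, PySem.Chars.isspace]
      rw [hsp, rstrip_eq_self_of_strip hl, PySem.Chars.join_singleton]
    | cons l' ls' =>
      obtain ⟨hl', hlne'⟩ := h l' (by simp)
      have ih' := ih (fun x hx => h x (by simp [hx]))
      obtain ⟨b', u', rfl⟩ : ∃ (b' : Char) (u' : List Char), l' = b' :: u' := by
        cases l' with | nil => exact absurd rfl hlne' | cons b' u' => exact ⟨b', u', rfl⟩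
      have ha' : PySem.Chars.isspace b' = false := head_not_space hl'
      have hlstr : (flatSp ((b' :: u') :: ls')).dropWhile PySem.Chars.isspace
          = flatSp ((b' :: u') :: ls') := by
        rw [flat_cons]
        exact lstrip_append_of_head ha'
      have hrstr : ((flatSp ((b' :: u') :: ls')).reverse.dropWhile PySem.Chars.isspace).reverse
          = PySem.Chars.join [' '] ((b' :: u') :: ls') := by
        have hihx := ih'
        unfold PySem.Chars.strip PySem.Chars.lstrip PySem.Chars.rstrip at hihx
        rwa [hlstr] at hihx
      have hjoin_ne : PySem.Chars.join [' '] ((b' :: u') :: ls') ≠ [] := by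
        cases ls' with
        | nil => rw [PySem.Chars.join_singleton]; exact hlne'
        | cons x xs => rw [PySem.Chars.join_cons_cons]; simp
      have hrne : (flatSp ((b' :: u') :: ls')).reverse.dropWhile PySem.Chars.isspace ≠ [] := by
        intro hh
        rw [hh] at hrstr
        simp at hrstr
        exact hjoin_ne hrstr
      have hra := rstrip_append (y := a :: t ++ [' ']) (z := flatSp ((b' :: u') :: ls')) hrne
      rw [show (a :: t ++ ([' '] ++ flatSp ((b' :: u') :: ls')))
          = (a :: t ++ [' ']) ++ flatSp ((b' :: u') :: ls') by simp, hra, hrstr]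
      rw [PySem.Chars.join_cons_cons]

lemma flat_nil_iff (ls : List (List Char)) : flatSp ls = [] ↔ ls = [] := by
  cases ls with
  | nil => simp [flatSp]
  | cons l t => simp [flatSp]

lemma join_nil_iff (ls : List (List Char)) (h : ∀ l ∈ ls, l ≠ []) :
    PySem.Chars.join [' '] ls = [] ↔ ls = [] := by
  cases ls with
  | nil => simp [PySem.Chars.join, List.intercalate]
  | cons l t =>
    cases t with
    | nil => simp [PySem.Chars.join, List.intercalate, h l (by simp)]
    | cons l' t' =>
      rw [PySem.Chars.join_cons_cons]
      constructor
      · intro hh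
        simp at hh
      · intro hh; simp at hh

-- ---- key nonemptiness at a marker ----

lemma slice_neg_two (x : List Char) (a b c : Char) :
    PySem.List.slice (x ++ [a, b, c]) none (some (-2)) = x ++ [a] := by
  have hlen : (x ++ [a, b, c]).length = x.length + 3 := by simp
  simp only [PySem.List.slice, PySem.List.clampIdx, hlen]
  split_ifs with h1 h2
  · exfalso; push_cast at h2; omega
  · have h3 : (((x.length + 3 : ℕ) : ℤ) + (-2 : ℤ)).toNat = x.length + 1 := by
      push_cast; omega
    rw [h3]
    simpa using take_len_succ x a [b, c]
  · exfalso; exact h1 (by norm_num)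

lemma keyOf_ne_nil {m : List Char} (hm : markerB m = true) : keyOf m ≠ [] := by
  unfold markerB at hm
  have : (": |".toList <:+ m) ∨ (": -".toList <:+ m) := by
    rcases Bool.or_eq_true_iff.mp hm with h | h
    · exact Or.inl ((PySem.Chars.endswith_iff _ _).mp h)
    · exact Or.inr ((PySem.Chars.endswith_iff _ _).mp h)
  have hsuff : ∃ c, [':', ' ', c] <:+ m := by
    rcases this with h | h
    · exact ⟨'|', h⟩
    · exact ⟨'-', h⟩
  obtain ⟨c, x, hx⟩ := hsuff
  unfold keyOf
  rw [← hx]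
  rw [PySem.Chars.slice_eq_listSlice, slice_neg_two]
  exact strip_ne_nil_of_mem (c := ':') (by simp) (by decide)

-- ---- relating A's fold to runA ----

lemma stepA_skip (st : List (List Char) × Option (List Char) × List Char) (line : List Char)
    (h : (PySem.Chars.strip line).isEmpty) : stepA st line = st := by
  obtain ⟨c, k, m⟩ := st
  simp [stepA, h]

lemma stepA_eq (st : List (List Char) × Option (List Char) × List Char) (line : List Char)
    (h : ¬(PySem.Chars.strip line).isEmpty) :
    stepA st line = stepA' st (PySem.Chars.strip line) := by
  obtain ⟨c, k, m⟩ := st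
  have h' : (PySem.Chars.strip line).isEmpty = false := by simpa using h
  cases k with
  | none => simp [stepA, stepA', keyOf, truthy, h', strip_strip]
  | some kk => simp [stepA, stepA', keyOf, truthy, h', strip_strip]

lemma foldA_filter (ls : List (List Char)) (st : List (List Char) × Option (List Char) × List Char) :
    ls.foldl stepA st
      = ((ls.map PySem.Chars.strip).filter (fun l => !l.isEmpty)).foldl stepA' st := by
  induction ls generalizing st with
  | nil => rfl
  | cons line ls ih =>
    by_cases h : (PySem.Chars.strip line).isEmpty
    · simp only [List.foldl_cons, List.map_cons, List.filter_cons, h, stepA_skip _ _ h]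
      simpa using ih st
    · simp only [List.foldl_cons, List.map_cons, List.filter_cons]
      rw [stepA_eq _ _ h]
      simp only [h, Bool.not_false]
      simpa using ih (stepA' st (PySem.Chars.strip line))

lemma foldA'_runA (ls : List (List Char)) (cleaned : List (List Char))
    (key : Option (List Char)) (mv : List Char) :
    fin (ls.foldl stepA' (cleaned, key, mv)) = cleaned ++ runA key mv ls := by
  induction ls generalizing cleaned key mv with
  | nil => simp [fin, runA]
  | cons l ls ih =>
    simp only [List.foldl_cons, runA]
    by_cases h1 : PySem.Chars.endswith l [':', ' ', '|']
    · rw [show stepA' (cleaned, key, mv) l = (cleaned, some (keyOf l), []) by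
        simp [stepA', h1]]
      rw [ih, if_pos (by simp [markerB, h1])]
    · by_cases h2 : PySem.Chars.endswith l [':', ' ', '-']
      · rw [show stepA' (cleaned, key, mv) l = (cleaned, some (keyOf l), []) by
          simp [stepA', h1, h2]]
        rw [ih, if_pos (by simp [markerB, h2])]
      · have hm : markerB l = false := by simp [markerB, h1, h2]
        by_cases h3 : truthy key
        · rw [show stepA' (cleaned, key, mv) l = (cleaned, key, mv ++ l ++ [' ']) by
            simp [stepA', h1, h2, h3]]
          rw [ih, hm, if_neg (by simp), if_pos h3]
        · by_cases h4 : PySem.Chars.isIn [':'] l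
          · rw [show stepA' (cleaned, key, mv) l = (cleaned ++ [l], key, mv) by
              simp [stepA', h1, h2, h3, h4]]
            rw [ih, hm]
            simp [h3, h4]
          · rw [show stepA' (cleaned, key, mv) l = (cleaned, key, mv) by
              simp [stepA', h1, h2, h3, h4]]
            rw [ih, hm]
            simp [h3, h4]

-- ---- runA characterizations ----

lemma runA_none_no_marker (ls : List (List Char)) (mv : List Char)
    (h : ∀ l ∈ ls, markerB l = false) :
    runA none mv ls = ls.filter (fun l => PySem.Chars.isIn [':'] l) := by
  induction ls generalizing mv with
  | nil => simp [runA, finAux]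
  | cons l ls ih =>
    have hl := h l (by simp)
    rw [show runA none mv (l :: ls)
        = (if PySem.Chars.isIn [':'] l then [l] else []) ++ runA none mv ls from by
      simp [runA, hl, truthy]]
    rw [ih mv (fun x hx => h x (by simp [hx]))]
    by_cases h4 : PySem.Chars.isIn [':'] l <;> simp [h4, List.filter_cons]

lemma runA_some_no_marker (ls : List (List Char)) (k mv : List Char) (hk : k ≠ [])
    (h : ∀ l ∈ ls, markerB l = false) :
    runA (some k) mv ls
      = if mv ++ flatSp ls = [] then []
        else [k ++ (": ".toList) ++ PySem.Chars.strip (mv ++ flatSp ls)] := by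
  induction ls generalizing mv with
  | nil =>
    have hke : k.isEmpty = false := by simpa [List.isEmpty_iff] using hk
    simp only [runA, finAux, flatSp, List.map_nil, List.flatten_nil, List.append_nil]
    by_cases hmv : mv = []
    · simp [hmv]
    · have : mv.isEmpty = false := by simpa [List.isEmpty_iff] using hmv
      simp [hke, this, hmv]
  | cons l ls ih =>
    have hl := h l (by simp)
    have hke : k.isEmpty = false := by simpa [List.isEmpty_iff] using hk
    have htr : truthy (some k) = true := by simp [truthy, hke]
    simp only [runA, hl, Bool.false_eq_true, if_false, htr, if_true]
    rw [ih (mv ++ l ++ [' ']) (fun x hx => h x (by simp [hx]))]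
    rw [flat_cons]
    have hap : (mv ++ l ++ [' ']) ++ flatSp ls = mv ++ (l ++ [' '] ++ flatSp ls) := by simp
    rw [hap]

lemma runA_split (head : List (List Char)) (m : List Char) (tail : List (List Char))
    (hhead : ∀ l ∈ head, markerB l = false) (hm : markerB m = true)
    (htail : ∀ l ∈ tail, markerB l = false) :
    runA none [] (head ++ m :: tail)
      = head.filter (fun l => PySem.Chars.isIn [':'] l)
        ++ (if flatSp tail = [] then []
            else [keyOf m ++ (": ".toList) ++ PySem.Chars.strip (flatSp tail)]) := by
  induction head with
  | nil =>
    simp only [List.nil_append, runA, hm, if_pos, List.filter_nil, List.nil_append]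
    rw [runA_some_no_marker tail (keyOf m) [] (keyOf_ne_nil hm) htail]
    simp
  | cons l head ih =>
    have hl := hhead l (by simp)
    rw [show runA none [] ((l :: head) ++ m :: tail)
        = (if PySem.Chars.isIn [':'] l then [l] else []) ++ runA none [] (head ++ m :: tail) from by
      simp [runA, hl, truthy]]
    rw [ih (fun x hx => hhead x (by simp [hx]))]
    simp only [List.filter_cons]
    by_cases h4 : PySem.Chars.isIn [':'] l <;> simp [h4]

-- membership facts about the filtered stripped lines
lemma lines_stripped (ls : List (List Char)) :
    ∀ l ∈ (ls.map PySem.Chars.strip).filter (fun l => !l.isEmpty),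
      PySem.Chars.strip l = l ∧ l ≠ [] := by
  intro l hl
  rw [List.mem_filter] at hl
  obtain ⟨hmem, hne⟩ := hl
  rw [List.mem_map] at hmem
  obtain ⟨x, _, rfl⟩ := hmem
  exact ⟨strip_strip x, by simpa [List.isEmpty_iff] using hne⟩

-- the A-side: clean_command unfolds to join of fin (fold)
lemma clean_command_eq_fin (response : String) :
    clean_command response
      = String.mk (PySem.Chars.join ['\n']
          (fin ((PySem.Chars.splitlines (cqChars response.toList)).foldl stepA ([], none, [])))) := by
  simp only [clean_command, fin]
  cases h : (PySem.Chars.splitlines (cqChars response.toList)).foldl stepA ([], none, []) with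
  | mk cleaned kv =>
    obtain ⟨key, mv⟩ := kv
    cases key with
    | none => simp [finAux]
    | some k =>
      by_cases hk : k = [] <;> by_cases hmv : mv = [] <;> simp [finAux, hk, hmv]

-- ===== VERDICT =====

theorem clean_command_spec : Claim_equal_clean_command := by
  intro response _ hpre
  unfold Spec_clean_command
  rw [clean_command_eq_fin, foldA_filter, foldA'_runA, alt_eq_core]
  simp only [List.nil_append]
  set lines := ((PySem.Chars.splitlines (cqChars response.toList)).map PySem.Chars.strip).filter
      (fun l => !l.isEmpty) with hlines
  have hstr : ∀ l ∈ lines, PySem.Chars.strip l = l ∧ l ≠ [] :=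
    lines_stripped (PySem.Chars.splitlines (cqChars response.toList))
  cases hdw : List.dropWhile (fun l => !markerB l) lines with
  | nil =>
    have hnone : ∀ l ∈ lines, markerB l = false := by
      intro l hl
      have := (List.dropWhile_eq_nil_iff).mp hdw l (by simpa using hl)
      simpa using this
    rw [altCore_nil lines hdw, runA_none_no_marker lines [] hnone]
  | cons m rest =>
    have hm : markerB m = true := by
      have := dw_head_false hdw
      simpa using this
    rw [altCore_cons lines m rest hdw]
    set tw := List.takeWhile (fun l => !markerB l) lines with htw
    have hsplit : lines = tw ++ m :: rest := by
      rw [htw, ← hdw, List.takeWhile_append_dropWhile]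
    have hhead : ∀ l ∈ tw, markerB l = false := by
      intro l hl
      have := List.mem_takeWhile_imp
        (show l ∈ List.takeWhile (fun l => !markerB l) lines from hl)
      simpa using this
    -- Pre_: at most one marker line, so everything after the first marker is marker-free
    have htail : ∀ l ∈ rest, markerB l = false := by
      have hcount : lines.countP markerB ≤ 1 := hpre
      rw [hsplit, List.countP_append, List.countP_cons] at hcount
      simp only [hm, if_pos] at hcount
      have : rest.countP markerB = 0 := by omega
      intro l hl
      simpa using (List.countP_eq_zero.mp this) l hl
    have htailstr : ∀ l ∈ rest, PySem.Chars.strip l = l ∧ l ≠ [] := by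
      intro l hl
      exact hstr l (by rw [hsplit]; simp [hl])
    conv_lhs => rw [hsplit]
    rw [runA_split tw m rest hhead hm htail]
    have hval : PySem.Chars.strip (flatSp rest) = PySem.Chars.join [' '] rest :=
      strip_flat rest htailstr
    by_cases hc : flatSp rest = []
    · have hje : (PySem.Chars.join [' '] rest).isEmpty = true := by
        rw [List.isEmpty_iff, join_nil_iff _ (fun l hl => (htailstr l hl).2)]
        exact (flat_nil_iff _).mp hc
      rw [if_pos hc, hje]
      simp
    · have hje : (PySem.Chars.join [' '] rest).isEmpty = false := by
        rw [List.isEmpty_eq_false_iff_exists_mem]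
        have hne : PySem.Chars.join [' '] rest ≠ [] := by
          rw [Ne, join_nil_iff _ (fun l hl => (htailstr l hl).2)]
          exact fun h => hc (by rw [h]; simp [flatSp])
        exact List.exists_mem_of_ne_nil _ hne
      rw [if_neg hc, hje]
      simp only [Bool.not_false, if_true]
      rw [hval]
      rfl
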